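-- pv_equiv track=rewrite | github.com/TaeyanG4/Baekjoon | 백준/Silver/1904. 01타일/01타일.py | solution
-- ===== SOURCE A (Python) =====
-- def solution(n):
--
--     if n == 1:
--         return 1
--     elif n == 2:
--         return 2
--
--     memo = [0] * (n+1)
--     memo[1] = 1
--     memo[2] = 2
--
--     for i in range(3, n+1):
--         memo[i] = memo[i-1] % 15746 + memo[i-2] % 15746
--
--     return memo[n] % 15746
-- ===== SOURCE B (Python) =====
-- def solution(n):
--     M = 15746
--
--     def fib(k):
--         # fast doubling: returns (F(k) % M, F(k+1) % M) with F(1)=F(2)=1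
--         if k == 0:
--             return (0, 1)
--         a, b = fib(k >> 1)
--         c = (a * ((2 * b - a) % M)) % M
--         d = (a * a + b * b) % M
--         if k & 1:
--             return (d, (c + d) % M)
--         return (c, d)
--
--     return fib(n + 1)[0]
-- ===== Notes on version B (the rewrite author's own statement) =====
-- stated objective: faster
-- what changed: Replaced A's O(n) bottom-up DP table (memo list filled 3..n) with recursive fast-doubling Fibonacci identities computed mod 15746, so the answer F(n+1) mod 15746 is obtained in O(log n) multiplications.
-- outside the precondition, e.g. on solution(0): A raises IndexError, B returns 1
import Mathlib
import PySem

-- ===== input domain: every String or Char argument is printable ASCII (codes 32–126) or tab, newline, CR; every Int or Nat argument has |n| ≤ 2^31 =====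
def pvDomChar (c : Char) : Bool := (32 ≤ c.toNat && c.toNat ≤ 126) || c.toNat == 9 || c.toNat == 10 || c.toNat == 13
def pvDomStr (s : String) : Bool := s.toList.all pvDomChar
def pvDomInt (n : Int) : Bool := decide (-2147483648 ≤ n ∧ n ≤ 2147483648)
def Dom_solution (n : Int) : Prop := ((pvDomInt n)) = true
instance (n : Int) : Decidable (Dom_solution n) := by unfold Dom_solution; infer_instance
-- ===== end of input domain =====

-- B replaces A's O(n) DP table with fast-doubling Fibonacci mod 15746 (objective: faster).


-- ===== PORT A =====
-- literal port of A: build the (n+1)-entry memo table, fill 3..n left to right, read memo[n]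
def solution (n : Int) : Int :=
  if n = 1 then 1
  else if n = 2 then 2
  else
    let memo : List Int := ((List.replicate (n + 1).toNat 0).set 1 1).set 2 2
    let memo : List Int :=
      (PySem.List.pyRange 3 (n + 1)).foldl
        (fun m i =>
          m.set i.toNat
            (PySem.Int.mod (m.getD (i - 1).toNat 0) 15746 +
             PySem.Int.mod (m.getD (i - 2).toNat 0) 15746)) memo
    PySem.Int.mod (memo.getD n.toNat 0) 15746

-- ===== PORT B =====
-- fast doubling, as in Source B's fib(k): returns (F(k) % 15746, F(k+1) % 15746).
-- The first Nat is structural fuel making Source B's recursion on k/2 structural; fuel = k always suffices.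
def fastFibGo : Nat → Nat → Int × Int
  | _, 0 => (0, 1)
  | 0, _ + 1 => (0, 1)   -- fuel exhausted: never reached when fuel ≥ k
  | (f + 1), (k + 1) =>
    let p := fastFibGo f ((k + 1) / 2)
    let a := p.1
    let b := p.2
    let c := PySem.Int.mod (a * PySem.Int.mod (2 * b - a) 15746) 15746
    let d := PySem.Int.mod (a * a + b * b) 15746
    if (k + 1) % 2 = 1 then (d, PySem.Int.mod (c + d) 15746) else (c, d)

def fastFibPair (k : Nat) : Int × Int := fastFibGo k k

def solution_alt (n : Int) : Int := (fastFibPair (n + 1).toNat).1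

-- ===== PRECONDITION & SPEC =====
-- Pre_ excludes n ≤ 0, where A raises IndexError (memo[1] = 1 on a table of length ≤ 1).
def Pre_solution (n : Int) : Prop := 1 ≤ n
instance (n : Int) : Decidable (Pre_solution n) := by unfold Pre_solution; infer_instance
def pvWitness_solution : Int := 5

def Spec_solution (n : Int) (out : Int) : Prop := out = solution_alt n
instance (n : Int) (out : Int) : Decidable (Spec_solution n out) := by unfold Spec_solution; infer_instance

-- ===== CLAIM (what is proved, stated in full; the proofs are below) =====
def Claim_equal_solution : Prop := ∀ (n : Int), Dom_solution n → Pre_solution n → Spec_solution n (solution n)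

-- ===== LEMMAS AND PROOFS =====

-- the common target value: F(k) mod 15746
def fibM (k : Nat) : Int := (Nat.fib k : Int) % 15746

lemma modMeq (x : Int) : Int.ModEq 15746 (x % 15746) x :=
  Int.emod_emod_of_dvd x dvd_rfl

lemma c_eq (m : Nat) :
    PySem.Int.mod (fibM m * PySem.Int.mod (2 * fibM (m + 1) - fibM m) 15746) 15746
      = fibM (2 * m) := by
  have hle : Nat.fib m ≤ 2 * Nat.fib (m + 1) := by
    have h : Nat.fib m ≤ Nat.fib (m + 1) := Nat.fib_mono (by omega)
    omega
  have hcast : ((Nat.fib (2 * m) : Int)) =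
      (Nat.fib m : Int) * (2 * (Nat.fib (m + 1) : Int) - (Nat.fib m : Int)) := by
    rw [Nat.fib_two_mul]; push_cast [Nat.cast_sub hle]; ring
  simp only [PySem.Int.mod_eq_emod_of_pos (by norm_num : (0:Int) < 15746), fibM, hcast]
  set A := (Nat.fib m : Int); set B := (Nat.fib (m + 1) : Int)
  have hA : Int.ModEq 15746 (A % 15746) A := modMeq A
  have hB : Int.ModEq 15746 (B % 15746) B := modMeq B
  exact (hA.mul ((modMeq _).trans (((hB.mul_left 2)).sub hA)))

lemma d_eq (m : Nat) :
    PySem.Int.mod (fibM m * fibM m + fibM (m + 1) * fibM (m + 1)) 15746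
      = fibM (2 * m + 1) := by
  have hcast : ((Nat.fib (2 * m + 1) : Int)) =
      (Nat.fib m : Int) * (Nat.fib m : Int) +
      (Nat.fib (m + 1) : Int) * (Nat.fib (m + 1) : Int) := by
    rw [Nat.fib_two_mul_add_one]; push_cast; ring
  simp only [PySem.Int.mod_eq_emod_of_pos (by norm_num : (0:Int) < 15746), fibM, hcast]
  set A := (Nat.fib m : Int); set B := (Nat.fib (m + 1) : Int)
  have hA : Int.ModEq 15746 (A % 15746) A := modMeq A
  have hB : Int.ModEq 15746 (B % 15746) B := modMeq B
  exact ((hA.mul hA).add (hB.mul hB))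

lemma fib_step (j : Nat) :
    PySem.Int.mod (fibM j + fibM (j + 1)) 15746 = fibM (j + 2) := by
  simp only [PySem.Int.mod_eq_emod_of_pos (by norm_num : (0:Int) < 15746), fibM]
  have : ((Nat.fib (j + 2) : Int)) = (Nat.fib j : Int) + (Nat.fib (j + 1) : Int) := by
    rw [Nat.fib_add_two]; push_cast; ring
  rw [this]
  exact ((modMeq _).add (modMeq _))

lemma fastFibGo_eq : ∀ (f k : Nat), k ≤ f → fastFibGo f k = (fibM k, fibM (k + 1)) := by
  intro f
  induction f with
  | zero =>
    intro k hk
    interval_cases k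
    decide
  | succ f ih =>
    intro k hk
    match k with
    | 0 => rfl
    | (k + 1) =>
      have h2 : (k + 1) / 2 ≤ f := by omega
      have hrec := ih _ h2
      simp only [fastFibGo, hrec]
      by_cases hpar : (k + 1) % 2 = 1
      · have hm : k = 2 * ((k + 1) / 2) := by omega
        rw [if_pos hpar, c_eq, d_eq, ← hm, fib_step]
      · have hme : 2 * ((k + 1) / 2) = k + 1 := by omega
        rw [if_neg hpar, c_eq, d_eq, hme]

lemma fastFibPair_eq (k : Nat) : fastFibPair k = (fibM k, fibM (k + 1)) :=
  fastFibGo_eq k k le_rfl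

-- A's memo recurrence as a function
def mA : Nat → Int
  | 0 => 0
  | 1 => 1
  | 2 => 2
  | (k + 3) => mA (k + 2) % 15746 + mA (k + 1) % 15746

lemma mA_mod : ∀ (k : Nat), 1 ≤ k → mA k % 15746 = fibM (k + 1) := by
  intro k
  induction k using Nat.strong_induction_on with
  | _ k ih =>
    match k with
    | 0 => intro h; omega
    | 1 => intro _; decide
    | 2 => intro _; decide
    | (j + 3) =>
      intro _
      have h1 := ih (j + 2) (by omega) (by omega)
      have h2 := ih (j + 1) (by omega) (by omega)
      show (mA (j + 2) % 15746 + mA (j + 1) % 15746) % 15746 = fibM (j + 4)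
      rw [h1, h2]
      have := fib_step (j + 2)
      simp only [PySem.Int.mod_eq_emod_of_pos (by norm_num : (0:Int) < 15746)] at this
      rw [Int.add_comm] at this
      exact this


-- A's fold over range(3, k+1), started from A's initial table of length N+1
def foldA (N k : Nat) : List Int :=
  (PySem.List.pyRange 3 ((k : Int) + 1)).foldl
    (fun m i =>
      m.set i.toNat
        (PySem.Int.mod (m.getD (i - 1).toNat 0) 15746 +
         PySem.Int.mod (m.getD (i - 2).toNat 0) 15746))
    (((List.replicate (N + 1) 0).set 1 1).set 2 2)

lemma loopA (N : Nat) (hN : 3 ≤ N) :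
    ∀ k, 2 ≤ k → k ≤ N →
      (foldA N k).length = N + 1 ∧ ∀ i, 1 ≤ i → i ≤ k → (foldA N k).getD i 0 = mA i := by
  intro k
  induction k with
  | zero => omega
  | succ k ihk =>
    intro _ hkN
    by_cases hk2 : 2 ≤ k
    case neg =>
      -- k + 1 = 2 : the range is empty, the table is the initial one
      have hk : k = 1 := by omega
      subst hk
      have hrange : PySem.List.pyRange 3 (((1 + 1 : Nat) : Int) + 1) = [] := by decide
      refine ⟨?_, ?_⟩
      · simp [foldA]
      · intro i h1 h2
        interval_cases i <;>
          norm_num [foldA, hrange, List.getD_eq_getElem?_getD, List.getElem?_set,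
            List.getElem?_replicate, mA, show 0 < N from by omega,
            show 1 < N + 1 from by omega, show 2 < N + 1 from by omega]
    case pos =>
      obtain ⟨hlen, hval⟩ := ihk hk2 (by omega)
      have hstep : foldA N (k + 1) =
          (foldA N k).set (k + 1)
            (PySem.Int.mod ((foldA N k).getD k 0) 15746 +
             PySem.Int.mod ((foldA N k).getD (k - 1) 0) 15746) := by
        have hcast : (((k + 1 : Nat) : Int) + 1) = ((k : Nat) : Int) + 1 + 1 := by push_cast; ring
        have hr := PySem.List.pyRange_one_succ_right
          (a := 3) (b := ((k : Nat) : Int) + 1) (by omega)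
        have e1 : (((k : Nat) : Int) + 1).toNat = k + 1 := by omega
        have e2 : (((k : Nat) : Int) + 1 - 1).toNat = k := by omega
        have e3 : (((k : Nat) : Int) + 1 - 2).toNat = k - 1 := by omega
        simp only [foldA, hcast, hr, List.foldl_append, List.foldl_cons, List.foldl_nil,
          e1, e2, e3]
      have hk1N : k + 1 < (foldA N k).length := by omega
      refine ⟨by simp [hstep, List.length_set, hlen], ?_⟩
      intro i h1 hik
      by_cases hi : i = k + 1
      case pos =>
        subst hi
        rw [hstep, List.getD_eq_getElem?_getD, List.getElem?_set, if_pos rfl, if_pos hk1N]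
        rw [hval k (by omega) (by omega), hval (k - 1) (by omega) (by omega)]
        obtain ⟨j, rfl⟩ : ∃ j, k = j + 2 := ⟨k - 2, by omega⟩
        simp only [PySem.Int.mod_eq_emod_of_pos (by norm_num : (0 : Int) < 15746)]
        show _ = mA (j + 3)
        simp [mA]
      case neg =>
        rw [hstep, List.getD_eq_getElem?_getD, List.getElem?_set,
          if_neg (by omega : ¬ k + 1 = i), ← List.getD_eq_getElem?_getD]
        exact hval i h1 (by omega)

theorem solution_spec : Claim_equal_solution := by
  intro n _ hpre
  unfold Spec_solution
  by_cases h1 : n = 1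
  · subst h1; decide
  by_cases h2 : n = 2
  · subst h2; decide
  -- n ≥ 3
  have hn3 : 3 ≤ n := by unfold Pre_solution at hpre; omega
  set N := n.toNat with hNdef
  have hn : n = (N : Int) := by omega
  have hN3 : 3 ≤ N := by omega
  have hA : solution n = PySem.Int.mod ((foldA N N).getD N 0) 15746 := by
    rw [hn]
    rw [solution]
    rw [if_neg (by omega : ¬ ((N : Int)) = 1), if_neg (by omega : ¬ ((N : Int)) = 2)]
    have e0 : (((N : Nat) : Int) + 1).toNat = N + 1 := by omega
    have e4 : ((N : Nat) : Int).toNat = N := by omega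
    simp only [foldA, e0, e4]
  obtain ⟨_, hval⟩ := loopA N hN3 N (by omega) le_rfl
  rw [hA, hval N (by omega) le_rfl]
  rw [PySem.Int.mod_eq_emod_of_pos (by norm_num : (0:Int) < 15746), mA_mod N (by omega)]
  have eB : (n + 1).toNat = N + 1 := by omega
  rw [solution_alt, eB, fastFibPair_eq]
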